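-- pv_equiv track=rewrite | github.com/ddv2311/HireSense | backend/video_analyzer.py | _analyze_speech_content
-- ===== SOURCE A (Python) =====
-- from typing import Dict, List, Optional
--
-- def _analyze_speech_content(transcript: str) -> Dict:
--     """Analyze speech content for communication skills"""
--     if not transcript:
--         return {'confidence_score': 0, 'clarity_score': 0, 'professionalism_score': 0}
--
--     words = transcript.lower().split()
--
--     # Confidence indicators
--     confidence_words = ['confident', 'experienced', 'skilled', 'accomplished', 'successful', 'proven']
--     confidence_score = min(100, len([w for w in words if w in confidence_words]) * 20)
--
--     # Clarity indicators (sentence structure, filler words)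
--     filler_words = ['um', 'uh', 'like', 'you know', 'basically', 'actually']
--     filler_count = len([w for w in words if w in filler_words])
--     clarity_score = max(0, 100 - (filler_count * 10))
--
--     # Professionalism indicators
--     professional_words = ['experience', 'skills', 'team', 'project', 'responsibility', 'achievement']
--     professionalism_score = min(100, len([w for w in words if w in professional_words]) * 15)
--
--     return {
--         'confidence_score': confidence_score,
--         'clarity_score': clarity_score,
--         'professionalism_score': professionalism_score,
--         'filler_word_count': filler_count
--     }
-- ===== SOURCE B (Python) =====
-- def _analyze_speech_content(transcript: str) -> dict:
--     """Analyze speech content for communication skills (frequency-table version)."""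
--     if not transcript:
--         return {'confidence_score': 0, 'clarity_score': 0, 'professionalism_score': 0}
--
--     counts = {}
--     for w in transcript.lower().split():
--         counts[w] = counts.get(w, 0) + 1
--
--     def total(keywords):
--         return sum(counts.get(k, 0) for k in keywords)
--
--     confidence_raw = total(['confident', 'experienced', 'skilled', 'accomplished', 'successful', 'proven'])
--     filler_count = total(['um', 'uh', 'like', 'you know', 'basically', 'actually'])
--     professional_raw = total(['experience', 'skills', 'team', 'project', 'responsibility', 'achievement'])
--
--     return {
--         'confidence_score': min(100, confidence_raw * 20),
--         'clarity_score': max(0, 100 - filler_count * 10),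
--         'professionalism_score': min(100, professional_raw * 15),
--         'filler_word_count': filler_count
--     }
-- ===== Notes on version B (the rewrite author's own statement) =====
-- stated objective: faster
-- what changed: B makes one pass over the words building a frequency table, then sums lookups over the constant keyword lists, instead of A's three separate membership-scan passes over the words.
import Mathlib
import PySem

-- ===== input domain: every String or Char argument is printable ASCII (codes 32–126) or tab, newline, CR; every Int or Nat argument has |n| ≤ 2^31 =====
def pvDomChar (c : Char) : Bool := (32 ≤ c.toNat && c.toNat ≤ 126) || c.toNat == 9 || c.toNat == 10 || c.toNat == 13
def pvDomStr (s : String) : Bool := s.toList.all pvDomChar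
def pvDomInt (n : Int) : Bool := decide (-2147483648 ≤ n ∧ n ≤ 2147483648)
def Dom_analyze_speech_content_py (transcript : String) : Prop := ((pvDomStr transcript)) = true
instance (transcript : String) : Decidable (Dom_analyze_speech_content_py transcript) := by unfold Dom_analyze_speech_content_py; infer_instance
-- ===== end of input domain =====

-- B replaces A's three membership-scan passes over the words by one frequency table plus
-- constant-size keyword lookups (objective: faster, constant-factor/one-pass).


-- ===== PORT A =====
def analyze_speech_content_py (transcript : String) : List (String × Int) :=
  if transcript = "" then
    [("confidence_score", 0), ("clarity_score", 0), ("professionalism_score", 0)]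
  else
    let words := PySem.Str.split₀ (PySem.Str.lower transcript)
    let confidence_words := ["confident", "experienced", "skilled", "accomplished", "successful", "proven"]
    let confidence_score := min 100 (((words.filter (fun w => confidence_words.contains w)).length : Int) * 20)
    let filler_words := ["um", "uh", "like", "you know", "basically", "actually"]
    let filler_count : Int := ((words.filter (fun w => filler_words.contains w)).length : Int)
    let clarity_score := max 0 (100 - filler_count * 10)
    let professional_words := ["experience", "skills", "team", "project", "responsibility", "achievement"]
    let professionalism_score := min 100 (((words.filter (fun w => professional_words.contains w)).length : Int) * 15)
    [("confidence_score", confidence_score), ("clarity_score", clarity_score),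
     ("professionalism_score", professionalism_score), ("filler_word_count", filler_count)]

-- ===== PORT B =====
-- sum of counts.get(k, 0) over a keyword list
def pvTotal (counts : PySem.Dict String Int) (keywords : List String) : Int :=
  (keywords.map (fun k => counts.getD k 0)).sum

def analyze_speech_content_py_alt (transcript : String) : List (String × Int) :=
  if transcript = "" then
    [("confidence_score", 0), ("clarity_score", 0), ("professionalism_score", 0)]
  else
    let counts := (PySem.Str.split₀ (PySem.Str.lower transcript)).foldl
      (fun d x => d.insert x (d.getD x 0 + 1)) PySem.Dict.empty
    let confidence_raw := pvTotal counts ["confident", "experienced", "skilled", "accomplished", "successful", "proven"]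
    let filler_count := pvTotal counts ["um", "uh", "like", "you know", "basically", "actually"]
    let professional_raw := pvTotal counts ["experience", "skills", "team", "project", "responsibility", "achievement"]
    [("confidence_score", min 100 (confidence_raw * 20)),
     ("clarity_score", max 0 (100 - filler_count * 10)),
     ("professionalism_score", min 100 (professional_raw * 15)),
     ("filler_word_count", filler_count)]

-- ===== PRECONDITION & SPEC =====
def Spec_analyze_speech_content_py (transcript : String) (out : List (String × Int)) : Prop := out = analyze_speech_content_py_alt transcript
instance (transcript : String) (out : List (String × Int)) : Decidable (Spec_analyze_speech_content_py transcript out) := by unfold Spec_analyze_speech_content_py; infer_instance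

-- ===== CLAIM (what is proved, stated in full; the proofs are below) =====
def Claim_equal_analyze_speech_content_py : Prop := ∀ (transcript : String), Dom_analyze_speech_content_py transcript → Spec_analyze_speech_content_py transcript (analyze_speech_content_py transcript)

-- ===== LEMMAS AND PROOFS =====

-- Σ_{k ∈ ks} [w = k] = [w ∈ ks] when ks has no duplicates
theorem pv_sum_indicator (ks : List String) (h : ks.Nodup) (w : String) :
    (ks.map (fun k => if w = k then (1 : Nat) else 0)).sum = if ks.contains w then 1 else 0 := by
  induction ks with
  | nil => simp
  | cons k rest ih =>
    rcases List.nodup_cons.mp h with ⟨hk, hrest⟩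
    simp only [List.map_cons, List.sum_cons, ih hrest, List.contains_cons]
    by_cases hwk : w = k
    · subst hwk
      simp [List.contains_eq_mem, hk]
    · simp [hwk, beq_iff_eq]

-- prepending a word adds its indicator to every keyword count
theorem pv_sum_count_cons (ks : List String) (w : String) (rest : List String) :
    (ks.map (fun k => (w :: rest).count k)).sum
      = (ks.map (fun k => rest.count k)).sum
        + (ks.map (fun k => if w = k then (1 : Nat) else 0)).sum := by
  induction ks with
  | nil => simp
  | cons k ks ih =>
    simp only [List.map_cons, List.sum_cons, List.count_cons]
    by_cases hwk : w = k
    · subst hwk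
      simp
      omega
    · simp [hwk, beq_iff_eq]
      omega

-- the number of words landing in a duplicate-free keyword list = the sum of the counts
theorem pv_filter_len (ws ks : List String) (h : ks.Nodup) :
    (ws.filter (fun w => ks.contains w)).length = (ks.map (fun k => ws.count k)).sum := by
  induction ws with
  | nil => simp
  | cons w rest ih =>
    rw [pv_sum_count_cons, pv_sum_indicator ks h w, List.filter_cons]
    by_cases hw : ks.contains w = true
    · rw [if_pos hw, if_pos hw, List.length_cons, ih]
    · rw [if_neg hw, if_neg hw, ih]
      omega

-- sum of casts = cast of sum
theorem pv_sum_cast (ks : List String) (f : String → Nat) :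
    (ks.map (fun k => ((f k : Nat) : Int))).sum = (((ks.map f).sum : Nat) : Int) := by
  induction ks with
  | nil => simp
  | cons k ks ih => simp [ih]

-- B's table lookup totals are A's filter lengths
theorem pv_total_eq (ws ks : List String) (h : ks.Nodup) :
    pvTotal (ws.foldl (fun d x => d.insert x (d.getD x 0 + 1)) PySem.Dict.empty) ks
      = ((ws.filter (fun w => ks.contains w)).length : Int) := by
  unfold pvTotal
  rw [PySem.Dict.foldl_insert_getD_add_one_eq_counter]
  have hmap : ks.map (fun k => (PySem.Dict.counter ws).getD k 0)
      = ks.map (fun k => ((ws.count k : Nat) : Int)) :=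
    List.map_congr_left (fun k _ => PySem.Dict.getD_counter ws k)
  rw [hmap, pv_sum_cast, ← pv_filter_len ws ks h]

-- ===== VERDICT (by name: the statement is the Claim_ definition above) =====
theorem analyze_speech_content_py_spec : Claim_equal_analyze_speech_content_py := by
  intro transcript _
  unfold Spec_analyze_speech_content_py analyze_speech_content_py analyze_speech_content_py_alt
  by_cases h : transcript = ""
  · simp [h]
  · simp only [h, if_false]
    rw [pv_total_eq _ _ (by decide), pv_total_eq _ _ (by decide), pv_total_eq _ _ (by decide)]
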